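-- pv_equiv track=rewrite | github.com/konradhj/KnockoffMuzero | muzero/simworlds/bitfall.py | _initial_receptors
-- ===== SOURCE A (Python) =====
-- def _initial_receptors(cols: int, num_segments: int) -> tuple[tuple[int, int], ...]:
--     # Evenly space num_segments receptors across cols, each ~floor(cols / (2 * num_segments)).
--     seg_len = max(1, cols // (2 * num_segments))
--     gap = max(1, (cols - num_segments * seg_len) // max(1, num_segments))
--     out: list[tuple[int, int]] = []
--     pos = 0
--     for _ in range(num_segments):
--         if pos + seg_len > cols:
--             break
--         out.append((pos, seg_len))
--         pos += seg_len + gap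
--     if not out:
--         out = [(0, 1)]
--     return tuple(out)
-- ===== SOURCE B (Python) =====
-- def _initial_receptors(cols: int, num_segments: int) -> tuple[tuple[int, int], ...]:
--     # Closed-form: count fitting segments arithmetically instead of accumulating pos in a loop.
--     seg_len = max(1, cols // (2 * num_segments))
--     gap = max(1, (cols - num_segments * seg_len) // max(1, num_segments))
--     stride = seg_len + gap
--     count = max(0, min(num_segments, (cols - seg_len) // stride + 1))
--     if count == 0:
--         return ((0, 1),)
--     return tuple((i * stride, seg_len) for i in range(count))
-- ===== Notes on version B (the rewrite author's own statement) =====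
-- stated objective: alternative
-- what changed: Replaces the incremental pos-accumulating loop with early break by a closed-form arithmetic count of fitting segments plus a comprehension over the index (positions i*stride).
import Mathlib
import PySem

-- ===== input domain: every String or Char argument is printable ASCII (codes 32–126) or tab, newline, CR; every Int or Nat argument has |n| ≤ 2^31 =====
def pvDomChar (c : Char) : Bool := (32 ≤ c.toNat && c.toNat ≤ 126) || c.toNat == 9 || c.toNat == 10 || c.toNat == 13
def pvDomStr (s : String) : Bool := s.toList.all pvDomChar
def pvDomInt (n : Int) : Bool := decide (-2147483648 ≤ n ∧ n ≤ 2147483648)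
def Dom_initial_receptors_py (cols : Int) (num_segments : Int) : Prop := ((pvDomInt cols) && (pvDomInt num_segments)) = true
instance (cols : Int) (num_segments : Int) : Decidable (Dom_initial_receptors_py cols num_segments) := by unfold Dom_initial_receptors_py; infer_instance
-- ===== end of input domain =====

-- B replaces A's pos-accumulating loop-with-break by a closed-form count of fitting segments plus an index comprehension (alternative decomposition, same cost).

-- ===== PORT A =====
-- the 'for _ in range(num_segments)' loop with break; fuel = max(0, num_segments) iterations, state = pos
def aLoop (cols s g : Int) : Nat → Int → List (Int × Int)
  | 0, _ => []
  | n + 1, pos =>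
      if pos + s > cols then []
      else (pos, s) :: aLoop cols s g n (pos + (s + g))

def initial_receptors_py (cols : Int) (num_segments : Int) : List (Int × Int) :=
  let seg_len := max 1 (PySem.Int.floordiv cols (2 * num_segments))
  let gap := max 1 (PySem.Int.floordiv (cols - num_segments * seg_len) (max 1 num_segments))
  let out := aLoop cols seg_len gap num_segments.toNat 0
  if out = [] then [(0, 1)] else out

-- ===== PORT B =====
def initial_receptors_py_alt (cols : Int) (num_segments : Int) : List (Int × Int) :=
  let seg_len := max 1 (PySem.Int.floordiv cols (2 * num_segments))
  let gap := max 1 (PySem.Int.floordiv (cols - num_segments * seg_len) (max 1 num_segments))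
  let stride := seg_len + gap
  let count := max 0 (min num_segments (PySem.Int.floordiv (cols - seg_len) stride + 1))
  if count = 0 then [(0, 1)]
  else (PySem.List.pyRange 0 count 1).map (fun i => (i * stride, seg_len))

-- ===== PRECONDITION & SPEC =====
-- Pre_ excludes num_segments = 0, where Python A raises ZeroDivisionError in 'cols // (2 * num_segments)'.
def Pre_initial_receptors_py (cols : Int) (num_segments : Int) : Prop := num_segments ≠ 0
instance (cols : Int) (num_segments : Int) : Decidable (Pre_initial_receptors_py cols num_segments) := by unfold Pre_initial_receptors_py; infer_instance
def pvWitness_initial_receptors_py : Int × Int := (10, 2)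

def Spec_initial_receptors_py (cols : Int) (num_segments : Int) (out : List (Int × Int)) : Prop := out = initial_receptors_py_alt cols num_segments
instance (cols : Int) (num_segments : Int) (out : List (Int × Int)) : Decidable (Spec_initial_receptors_py cols num_segments out) := by unfold Spec_initial_receptors_py; infer_instance

-- ===== CLAIM (what is proved, stated in full; the proofs are below) =====
def Claim_equal_initial_receptors_py : Prop := ∀ (cols : Int) (num_segments : Int), Dom_initial_receptors_py cols num_segments → Pre_initial_receptors_py cols num_segments → Spec_initial_receptors_py cols num_segments (initial_receptors_py cols num_segments)

-- ===== LEMMAS AND PROOFS =====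

-- number of loop iterations of aLoop that append, as a Nat
def pvCnt (cols s st : Int) (n : Nat) (pos : Int) : Nat :=
  if pos + s ≤ cols then min n ((cols - s - pos).toNat / st.toNat + 1) else 0

theorem aLoop_eq (cols s g : Int) (hst : 0 < s + g) :
    ∀ (n : Nat) (pos : Int),
      aLoop cols s g n pos
        = (List.range (pvCnt cols s (s + g) n pos)).map
            (fun (i : Nat) => (pos + (i : Int) * (s + g), s)) := by
  intro n
  induction n with
  | zero =>
      intro pos
      simp [aLoop, pvCnt]
  | succ n ih =>
      intro pos
      by_cases h : pos + s > cols
      · simp [aLoop, h, pvCnt, not_le.mpr h]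
      · push_neg at h
        have hkey : pvCnt cols s (s + g) n (pos + (s + g))
            = pvCnt cols s (s + g) (n + 1) pos - 1 := by
          unfold pvCnt
          by_cases h2 : pos + (s + g) + s ≤ cols
          · have hx : (cols - s - pos).toNat = (cols - s - (pos + (s + g))).toNat + (s + g).toNat := by
              omega
            have hdiv : (cols - s - pos).toNat / (s + g).toNat
                = (cols - s - (pos + (s + g))).toNat / (s + g).toNat + 1 := by
              rw [hx, Nat.add_div_right _ (by omega)]
            rw [if_pos h2, if_pos h, hdiv]
            generalize (cols - s - (pos + (s + g))).toNat / (s + g).toNat = q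
            rcases Nat.le_total n (q + 1) with hle | hle
            · rw [Nat.min_eq_left hle, Nat.min_eq_left (by omega)]
              omega
            · rw [Nat.min_eq_right hle, Nat.min_eq_right (by omega)]
              omega
          · have hx : (cols - s - pos).toNat < (s + g).toNat := by omega
            have hq : (cols - s - pos).toNat / (s + g).toNat = 0 := Nat.div_eq_of_lt hx
            rw [if_neg h2, if_pos h, hq]
            rw [Nat.min_eq_right (by omega)]
        have hpos : 1 ≤ pvCnt cols s (s + g) (n + 1) pos := by
          unfold pvCnt
          rw [if_pos h]
          exact Nat.le_min.mpr ⟨Nat.succ_le_succ (Nat.zero_le _), Nat.succ_le_succ (Nat.zero_le _)⟩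
        obtain ⟨m, hm⟩ : ∃ m, pvCnt cols s (s + g) (n + 1) pos = m + 1 :=
          ⟨pvCnt cols s (s + g) (n + 1) pos - 1, by omega⟩
        simp only [aLoop]
        rw [if_neg (not_lt.mpr h), ih, hkey, hm, Nat.add_sub_cancel,
          List.range_succ_eq_map]
        simp only [List.map_cons, List.map_map, Nat.cast_zero, zero_mul, add_zero]
        congr 1
        apply List.map_congr_left
        intro i _
        simp only [Function.comp_apply, Prod.mk.injEq]
        exact ⟨by push_cast; ring, trivial⟩

theorem core_eq (cols n s g : Int) (hs1 : 1 ≤ s) (hg1 : 1 ≤ g) :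
    (if aLoop cols s g n.toNat 0 = [] then [((0 : Int), (1 : Int))] else aLoop cols s g n.toNat 0)
      = (if max 0 (min n (PySem.Int.floordiv (cols - s) (s + g) + 1)) = 0 then [(0, 1)]
         else (PySem.List.pyRange 0 (max 0 (min n (PySem.Int.floordiv (cols - s) (s + g) + 1))) 1).map
           (fun i => (i * (s + g), s))) := by
  have hst : 0 < s + g := by omega
  set st := s + g with hstdef
  set fd := PySem.Int.floordiv (cols - s) st with hfd
  set c := max 0 (min n (fd + 1)) with hc
  rw [aLoop_eq cols s g hst n.toNat 0]
  set m := pvCnt cols s st n.toNat 0 with hm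
  have hcm : c.toNat = m ∧ (c = 0 ↔ m = 0) := by
    by_cases hcase : s ≤ cols
    · have hx : cols - s = (((cols - s).toNat : Nat) : Int) := by omega
      have hstx : st = ((st.toNat : Nat) : Int) := by omega
      have hfdq : fd = (((cols - s).toNat / st.toNat : Nat) : Int) := by
        rw [hfd, hx, hstx]
        exact PySem.Int.floordiv_natCast _ _
      have hm' : m = min n.toNat ((cols - s).toNat / st.toNat + 1) := by
        rw [hm]; unfold pvCnt
        simp only [zero_add, if_pos hcase, Int.sub_zero]
      rw [hc, hfdq, hm']
      constructor <;> omega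
    · push_neg at hcase
      have hfdneg : fd < 0 := by
        rw [hfd, PySem.Int.floordiv_lt_iff_lt_mul hst]
        omega
      have hm0 : m = 0 := by
        rw [hm]; unfold pvCnt
        simp only [zero_add]
        rw [if_neg (by omega)]
      rw [hc, hm0]
      constructor <;> omega
  obtain ⟨hc1, hc2⟩ := hcm
  by_cases hz : c = 0
  · have : m = 0 := hc2.mp hz
    simp [hz, this]
  · have hmne : m ≠ 0 := fun h => hz (hc2.mpr h)
    have hne : (List.range m).map (fun (i : Nat) => ((0 : Int) + (i : Int) * (s + g), s)) ≠ [] := by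
      simp [List.map_eq_nil_iff, List.range_eq_nil, hmne]
    rw [if_neg hz, if_neg hne, PySem.List.pyRange_one, List.map_map, ← hc1]
    simp only [Int.sub_zero]
    apply List.map_congr_left
    intro i _
    simp [Function.comp, hstdef]

theorem initial_receptors_py_spec : Claim_equal_initial_receptors_py := by
  intro cols n _ hn
  unfold Spec_initial_receptors_py initial_receptors_py initial_receptors_py_alt
  exact core_eq cols n _ _ (le_max_left _ _) (le_max_left _ _)
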